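-- pv_equiv track=rewrite | github.com/gudfit/HeavenHellII | src/defense.py | attack_contribution_index_fast
-- ===== SOURCE A (Python) =====
-- def rest_weight_fast(w, inb, g, v):
--     return sum(w[u][v] for u in inb[v] if u != g)
--
-- def max_need_tau_fast(w, inb, g, tau):
--     n = len(w)
--     best_v = -1
--     best_val = -(10**9)
--     for v in range(n):
--         if v == g:
--             continue
--         val = rest_weight_fast(w, inb, g, v) - tau[v]
--         if val > best_val:
--             best_val, best_v = val, v
--     return best_val, best_v
--
-- def attack_contribution_index_fast(w, inb, g, tau, u):
--     base, _ = max_need_tau_fast(w, inb, g, tau)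
--     n = len(w)
--     best_val = -(10**9)
--     for v in range(n):
--         if v == g:
--             continue
--         new_rest = rest_weight_fast(w, inb, g, v) - (w[u][v] if u != g else 0)
--         val = new_rest - tau[v]
--         if val > best_val:
--             best_val = val
--     return base - best_val
-- ===== SOURCE B (Python) =====
-- def attack_contribution_index_fast(w, inb, g, tau, u):
--     n = len(w)
--     rest = [0 if v == g else sum(w[x][v] for x in inb[v] if x != g)
--             for v in range(n)]
--     best_base = -(10**9)
--     best_adj = -(10**9)
--     for v in range(n):
--         if v == g:
--             continue
--         b = rest[v] - tau[v]
--         if b > best_base: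
--             best_base = b
--         a = b - (w[u][v] if u != g else 0)
--         if a > best_adj:
--             best_adj = a
--     return best_base - best_adj
-- ===== Notes on version B (the rewrite author's own statement) =====
-- stated objective: simpler
-- what changed: Precomputes each vertex's rest weight once into a table and fuses A's two full max-scans (each re-summing rest weights through a helper) into a single pass maintaining both running maxima.
import Mathlib
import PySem

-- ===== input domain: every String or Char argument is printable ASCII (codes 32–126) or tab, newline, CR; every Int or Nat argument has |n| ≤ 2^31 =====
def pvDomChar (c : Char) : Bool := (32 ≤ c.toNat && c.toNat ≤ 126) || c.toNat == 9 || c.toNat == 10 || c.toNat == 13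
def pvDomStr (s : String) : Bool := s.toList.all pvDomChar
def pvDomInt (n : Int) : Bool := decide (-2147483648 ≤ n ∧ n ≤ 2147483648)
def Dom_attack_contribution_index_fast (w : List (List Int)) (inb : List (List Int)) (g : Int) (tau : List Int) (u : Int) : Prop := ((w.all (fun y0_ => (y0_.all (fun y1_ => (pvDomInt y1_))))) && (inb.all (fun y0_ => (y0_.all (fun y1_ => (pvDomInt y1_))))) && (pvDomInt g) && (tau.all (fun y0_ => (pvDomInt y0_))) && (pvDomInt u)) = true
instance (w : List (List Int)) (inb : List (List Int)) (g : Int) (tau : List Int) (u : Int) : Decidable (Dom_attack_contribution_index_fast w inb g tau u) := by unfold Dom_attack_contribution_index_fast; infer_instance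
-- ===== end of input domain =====

-- B precomputes every vertex's rest weight once into a table and fuses A's two max-scans
-- into one pass with two running maxima (objective: simpler; same asymptotic cost).

-- ===== PORT A =====
def rest_weight_fast (w : List (List Int)) (inb : List (List Int)) (g : Int) (v : Int) : Int :=
  (PySem.List.pyGetD inb v []).foldl
    (fun s x => if x ≠ g then s + PySem.List.pyGetD (PySem.List.pyGetD w x []) v 0 else s) 0

def max_need_tau_fast (w : List (List Int)) (inb : List (List Int)) (g : Int) (tau : List Int) : Int × Int :=
  let n : Int := (w.length : Int)
  (PySem.List.pyRange 0 n 1).foldl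
    (fun (s : Int × Int) v =>
      if v = g then s
      else
        let val := rest_weight_fast w inb g v - PySem.List.pyGetD tau v 0
        if val > s.1 then (val, v) else s)
    (-(10 ^ 9), -1)

def attack_contribution_index_fast (w : List (List Int)) (inb : List (List Int)) (g : Int) (tau : List Int) (u : Int) : Int :=
  let base := (max_need_tau_fast w inb g tau).1
  let n : Int := (w.length : Int)
  let best_val :=
    (PySem.List.pyRange 0 n 1).foldl
      (fun (s : Int) v =>
        if v = g then s
        else
          let new_rest := rest_weight_fast w inb g v -
            (if u ≠ g then PySem.List.pyGetD (PySem.List.pyGetD w u []) v 0 else 0)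
          let val := new_rest - PySem.List.pyGetD tau v 0
          if val > s then val else s)
      (-(10 ^ 9))
  base - best_val

-- ===== PORT B =====
def attack_contribution_index_fast_alt (w : List (List Int)) (inb : List (List Int)) (g : Int) (tau : List Int) (u : Int) : Int :=
  let n : Int := (w.length : Int)
  let rest := (PySem.List.pyRange 0 n 1).map
    (fun v => if v = g then 0
      else (PySem.List.pyGetD inb v []).foldl
        (fun s x => if x ≠ g then s + PySem.List.pyGetD (PySem.List.pyGetD w x []) v 0 else s) 0)
  let p :=
    (PySem.List.pyRange 0 n 1).foldl
      (fun (p : Int × Int) v =>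
        if v = g then p
        else
          let b := PySem.List.pyGetD rest v 0 - PySem.List.pyGetD tau v 0
          let p1 := if b > p.1 then b else p.1
          let a := b - (if u ≠ g then PySem.List.pyGetD (PySem.List.pyGetD w u []) v 0 else 0)
          let p2 := if a > p.2 then a else p.2
          (p1, p2))
      (-(10 ^ 9), -(10 ^ 9))
  p.1 - p.2

-- ===== PRECONDITION & SPEC =====
-- Pre_: exactly the inputs on which the Python A returns normally — every index
-- A's loops perform (inb[v], tau[v], w[x][v] for x in inb[v] with x != g, and
-- w[u][v] when u != g) is in Python's (negative-index-wrapping) range.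
def Pre_attack_contribution_index_fast (w : List (List Int)) (inb : List (List Int)) (g : Int) (tau : List Int) (u : Int) : Prop :=
  ∀ v ∈ PySem.List.pyRange 0 (w.length : Int) 1, v ≠ g →
    PySem.Raise.InRange inb.length v ∧ PySem.Raise.InRange tau.length v ∧
    (∀ x ∈ PySem.List.pyGetD inb v [], x ≠ g →
      PySem.Raise.InRange w.length x ∧ PySem.Raise.InRange (PySem.List.pyGetD w x []).length v) ∧
    (u ≠ g → PySem.Raise.InRange w.length u ∧ PySem.Raise.InRange (PySem.List.pyGetD w u []).length v)
instance (w : List (List Int)) (inb : List (List Int)) (g : Int) (tau : List Int) (u : Int) : Decidable (Pre_attack_contribution_index_fast w inb g tau u) := by unfold Pre_attack_contribution_index_fast; infer_instance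

def pvWitness_attack_contribution_index_fast : List (List Int) × List (List Int) × Int × List Int × Int :=
  ([[1]], [[0]], 5, [3], 0)

def Spec_attack_contribution_index_fast (w : List (List Int)) (inb : List (List Int)) (g : Int) (tau : List Int) (u : Int) (out : Int) : Prop := out = attack_contribution_index_fast_alt w inb g tau u
instance (w : List (List Int)) (inb : List (List Int)) (g : Int) (tau : List Int) (u : Int) (out : Int) : Decidable (Spec_attack_contribution_index_fast w inb g tau u out) := by unfold Spec_attack_contribution_index_fast; infer_instance

-- ===== CLAIM (what is proved, stated in full; the proofs are below) =====
def Claim_equal_attack_contribution_index_fast : Prop := ∀ (w : List (List Int)) (inb : List (List Int)) (g : Int) (tau : List Int) (u : Int), Dom_attack_contribution_index_fast w inb g tau u → Pre_attack_contribution_index_fast w inb g tau u → Spec_attack_contribution_index_fast w inb g tau u (attack_contribution_index_fast w inb g tau u)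

-- ===== LEMMAS AND PROOFS =====

-- the first component of A's (best_val, best_v) fold ignores the tracked index
theorem pv_fst_fold (g : Int) (f : Int → Int) :
    ∀ (l : List Int) (b i : Int),
      (l.foldl (fun (s : Int × Int) v => if v = g then s else if f v > s.1 then (f v, v) else s) (b, i)).1
      = l.foldl (fun (s : Int) v => if v = g then s else if f v > s then f v else s) b := by
  intro l
  induction l with
  | nil => intro b i; rfl
  | cons v l ih =>
    intro b i
    by_cases hv : v = g
    · simp [List.foldl_cons, hv, ih]
    · by_cases h2 : f v > b
      · simp [List.foldl_cons, hv, h2, ih]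
      · simp [List.foldl_cons, hv, h2, ih]

-- B's fused fold splits into its two independent component folds
theorem pv_pair_fold (g : Int) (f h : Int → Int) :
    ∀ (l : List Int) (x y : Int),
      l.foldl (fun (p : Int × Int) v =>
          if v = g then p
          else ((if f v > p.1 then f v else p.1), (if h v > p.2 then h v else p.2))) (x, y)
      = (l.foldl (fun (s : Int) v => if v = g then s else if f v > s then f v else s) x,
         l.foldl (fun (s : Int) v => if v = g then s else if h v > s then h v else s) y) := by
  intro l
  induction l with
  | nil => intro x y; rfl
  | cons v l ih =>
    intro x y
    by_cases hv : v = g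
    · simp [List.foldl_cons, hv, ih]
    · simp [List.foldl_cons, hv, ih]

-- B's table lookup equals the directly computed rest weight on every in-range vertex
theorem pv_table_fold (w inb : List (List Int)) (g u : Int) (tau : List Int) :
    ∀ (l : List Int), (∀ v ∈ l, 0 ≤ v ∧ v < (w.length : Int)) → ∀ (p : Int × Int),
      l.foldl
        (fun (p : Int × Int) v =>
        if v = g then p
        else
          (if PySem.List.pyGetD
                ((PySem.List.pyRange 0 (w.length : Int) 1).map
                  (fun v => if v = g then 0
                    else (PySem.List.pyGetD inb v []).foldl
                      (fun s x => if x ≠ g then s + PySem.List.pyGetD (PySem.List.pyGetD w x []) v 0 else s) 0))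
                v 0 - PySem.List.pyGetD tau v 0 > p.1
            then PySem.List.pyGetD
                ((PySem.List.pyRange 0 (w.length : Int) 1).map
                  (fun v => if v = g then 0
                    else (PySem.List.pyGetD inb v []).foldl
                      (fun s x => if x ≠ g then s + PySem.List.pyGetD (PySem.List.pyGetD w x []) v 0 else s) 0))
                v 0 - PySem.List.pyGetD tau v 0 else p.1,
           if PySem.List.pyGetD
                ((PySem.List.pyRange 0 (w.length : Int) 1).map
                  (fun v => if v = g then 0
                    else (PySem.List.pyGetD inb v []).foldl
                      (fun s x => if x ≠ g then s + PySem.List.pyGetD (PySem.List.pyGetD w x []) v 0 else s) 0))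
                v 0 - PySem.List.pyGetD tau v 0 -
                (if u ≠ g then PySem.List.pyGetD (PySem.List.pyGetD w u []) v 0 else 0) > p.2
            then PySem.List.pyGetD
                ((PySem.List.pyRange 0 (w.length : Int) 1).map
                  (fun v => if v = g then 0
                    else (PySem.List.pyGetD inb v []).foldl
                      (fun s x => if x ≠ g then s + PySem.List.pyGetD (PySem.List.pyGetD w x []) v 0 else s) 0))
                v 0 - PySem.List.pyGetD tau v 0 -
                (if u ≠ g then PySem.List.pyGetD (PySem.List.pyGetD w u []) v 0 else 0) else p.2))
        p
      = l.foldl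
        (fun (p : Int × Int) v =>
        if v = g then p
        else
          (if ((PySem.List.pyGetD inb v []).foldl
                  (fun s x => if x ≠ g then s + PySem.List.pyGetD (PySem.List.pyGetD w x []) v 0 else s) 0)
                - PySem.List.pyGetD tau v 0 > p.1
            then ((PySem.List.pyGetD inb v []).foldl
                  (fun s x => if x ≠ g then s + PySem.List.pyGetD (PySem.List.pyGetD w x []) v 0 else s) 0)
                - PySem.List.pyGetD tau v 0 else p.1,
           if ((PySem.List.pyGetD inb v []).foldl
                  (fun s x => if x ≠ g then s + PySem.List.pyGetD (PySem.List.pyGetD w x []) v 0 else s) 0)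
                - PySem.List.pyGetD tau v 0 -
                (if u ≠ g then PySem.List.pyGetD (PySem.List.pyGetD w u []) v 0 else 0) > p.2
            then ((PySem.List.pyGetD inb v []).foldl
                  (fun s x => if x ≠ g then s + PySem.List.pyGetD (PySem.List.pyGetD w x []) v 0 else s) 0)
                - PySem.List.pyGetD tau v 0 -
                (if u ≠ g then PySem.List.pyGetD (PySem.List.pyGetD w u []) v 0 else 0) else p.2))
        p := by
  intro l
  induction l with
  | nil => intro _ p; rfl
  | cons v l ih =>
    intro hb p
    have hv := hb v (List.mem_cons_self ..)
    rw [List.foldl_cons, List.foldl_cons, ih (fun x hx => hb x (List.mem_cons_of_mem _ hx))]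
    by_cases hg : v = g
    · simp [hg]
    · rw [PySem.List.pyGetD_map_pyRange_of_nonneg _ _ _ _ hv.1 hv.2]
      simp [hg]

-- ===== VERDICT (by name: the statement is the Claim_ definition above) =====
theorem attack_contribution_index_fast_spec : Claim_equal_attack_contribution_index_fast := by
  intro w inb g tau u _ _
  unfold Spec_attack_contribution_index_fast attack_contribution_index_fast
    attack_contribution_index_fast_alt max_need_tau_fast rest_weight_fast
  dsimp only
  rw [pv_fst_fold]
  rw [pv_table_fold w inb g u tau _
      (fun v hv => by
        have h := (PySem.List.mem_pyRange_one).1 hv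
        exact ⟨h.1, h.2⟩)]
  rw [pv_pair_fold]
  dsimp only
  have hfun :
      (fun (s : Int) (v : Int) =>
        if v = g then s
        else
          if ((PySem.List.pyGetD inb v []).foldl
                (fun s x => if x ≠ g then s + PySem.List.pyGetD (PySem.List.pyGetD w x []) v 0 else s) 0)
              - (if u ≠ g then PySem.List.pyGetD (PySem.List.pyGetD w u []) v 0 else 0)
              - PySem.List.pyGetD tau v 0 > s
          then ((PySem.List.pyGetD inb v []).foldl
                (fun s x => if x ≠ g then s + PySem.List.pyGetD (PySem.List.pyGetD w x []) v 0 else s) 0)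
              - (if u ≠ g then PySem.List.pyGetD (PySem.List.pyGetD w u []) v 0 else 0)
              - PySem.List.pyGetD tau v 0 else s)
      = (fun (s : Int) (v : Int) =>
        if v = g then s
        else
          if ((PySem.List.pyGetD inb v []).foldl
                (fun s x => if x ≠ g then s + PySem.List.pyGetD (PySem.List.pyGetD w x []) v 0 else s) 0)
              - PySem.List.pyGetD tau v 0
              - (if u ≠ g then PySem.List.pyGetD (PySem.List.pyGetD w u []) v 0 else 0) > s
          then ((PySem.List.pyGetD inb v []).foldl
                (fun s x => if x ≠ g then s + PySem.List.pyGetD (PySem.List.pyGetD w x []) v 0 else s) 0)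
              - PySem.List.pyGetD tau v 0
              - (if u ≠ g then PySem.List.pyGetD (PySem.List.pyGetD w u []) v 0 else 0) else s) := by
    funext s v
    by_cases hg : v = g
    · simp [hg]
    · simp only [if_neg hg]
      rw [sub_right_comm]
  rw [hfun]
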